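-- pv_equiv track=rewrite | github.com/stefnomden/Modular-Curve-Computations | Generate_msymbols+relations.py | three_term_relations
-- ===== SOURCE A (Python) =====
-- import math
--
-- def generate_M_symbols(N): #returns a list containing all inequivalent M-symbols for N. The M symbol (c:d) has the form [c,d] in this list.
--   elements = []
--
--   for n in range(1,N+1):                    #create the set of elements where the equivalence is defined.
--     for m in range(1,N+1):
--       if math.gcd(math.gcd(m,n),N) == 1:
--         elements.append([m,n])
--
--   remove = []
--
--   for i in range(0,len(elements)):          #check which elements are equivalent and add them to the elements that are to be removed
--     for j in range(i,len(elements)):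
--       if elements[i][0]*elements[j][1] % N == elements[j][0]*elements[i][1] % N and i != j:
--         remove.append(elements[j])
--
--   for r in remove:    #remove the equivalent elements
--     if r in elements:
--       elements.remove(r)
--
--   return elements
--
-- def representative(representatives, element, N): #takes list of representatives, usually generate_M_symbols(N), and an element [c,d] representing (c:d).
--   for M in representatives:                      #returns the element in the representatives to which (c:d) is equivalent
--     if (M[0]*element[1]) % N == (M[1]*element[0]) % N:
--       return M
--
-- def three_term_relations(N): #takes a positive integer N and returns a list with all relations of the form [c,d]+[c+d,-c]+[d:-c-d] = 0 as a string
--   relations = []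
--   done = []
--   representatives = generate_M_symbols(N)
--   for M in representatives:
--     if M not in done:
--       relations.append('{} + {} + {} = 0'.format(M, representative(representatives, [M[0]+M[1], -M[0]], N),
--                                                representative(representatives, [M[1], -M[0]-M[1]], N)))
--       done.append(M)
--       done.append(representative(representatives, [M[0]+M[1], -M[0]], N))
--       done.append(representative(representatives, [M[1], -M[0]-M[1]], N))
--   return relations
-- ===== SOURCE B (Python) =====
-- import math
--
-- def three_term_relations(N):
--     # Single greedy pass over candidate symbols: keep the first symbol of each
--     # projective class, and record every symbol's representative in a dict so the
--     # relation phase looks representatives up in O(1).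
--     reps = []
--     classmap = {}
--     for n in range(1, N + 1):
--         for m in range(1, N + 1):
--             if math.gcd(math.gcd(m, n), N) == 1:
--                 r = _first_match(reps, m, n, N)
--                 if r is None:
--                     reps.append((m, n))
--                     classmap[(m, n)] = (m, n)
--                 else:
--                     classmap[(m, n)] = r
--     relations = []
--     done = set()
--     for M in reps:
--         if M not in done:
--             r2 = classmap.get(((M[0] + M[1] - 1) % N + 1, (-M[0] - 1) % N + 1))
--             r3 = classmap.get(((M[1] - 1) % N + 1, (-M[0] - M[1] - 1) % N + 1))
--             relations.append('{} + {} + {} = 0'.format(_fmt(M), _fmt(r2), _fmt(r3)))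
--             done.add(M)
--             if r2 is not None:
--                 done.add(r2)
--             if r3 is not None:
--                 done.add(r3)
--     return relations
--
-- def _first_match(reps, m, n, N):
--     for r in reps:
--         if (r[0] * n - r[1] * m) % N == 0:
--             return r
--     return None
--
-- def _fmt(p):
--     return 'None' if p is None else '[{}, {}]'.format(p[0], p[1])
-- ===== Notes on version B (the rewrite author's own statement) =====
-- stated objective: faster
-- what changed: Replaces A's three-phase generation (materialise all O(N^2) candidate symbols, O(M^2) pairwise marking of equivalent pairs, then repeated list.remove passes) and its per-relation O(M) representative scans and O(M) 'done' list scans by a single greedy pass that keeps only the first symbol of each projective class (checking each candidate against the ~N kept representatives only) while recording every candidate's representative in a dict, so the relation phase finds representatives by one O(1) dict lookup of the residue-normalised symbol and tracks 'done' in a set.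
import Mathlib
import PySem

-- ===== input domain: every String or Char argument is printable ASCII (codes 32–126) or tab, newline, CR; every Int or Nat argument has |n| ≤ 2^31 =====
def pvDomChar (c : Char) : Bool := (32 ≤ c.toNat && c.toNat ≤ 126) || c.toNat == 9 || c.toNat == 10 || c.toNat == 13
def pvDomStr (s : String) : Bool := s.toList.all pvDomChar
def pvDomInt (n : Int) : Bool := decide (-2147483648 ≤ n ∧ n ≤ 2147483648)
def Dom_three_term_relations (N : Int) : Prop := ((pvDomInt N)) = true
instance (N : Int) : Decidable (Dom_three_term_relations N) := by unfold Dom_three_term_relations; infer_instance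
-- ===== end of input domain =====

-- B is a faster re-implementation: one greedy pass keeps the first symbol of each class and
-- records every symbol's representative in a dict, replacing A's pairwise marking/removal
-- phases and its linear representative scans; return values are proved equal.

-- ===== PORT A =====

-- str([m, n]) (A) and '[{}, {}]'.format(m, n) (B) produce the same text; shared by both ports
def pvFmt (p : Int × Int) : String := "[" ++ PySem.Int.toStr p.1 ++ ", " ++ PySem.Int.toStr p.2 ++ "]"

def pvFmtOpt : Option (Int × Int) → String
  | none => "None"
  | some p => pvFmt p

-- math.gcd(math.gcd(m, n), N) == 1 (shared: B runs the identical coprimality test)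
def pvCoprime (m n N : Int) : Bool := (Int.gcd (Int.gcd m n : Int) N : Int) == 1

-- a[0]*b[1] % N == b[0]*a[1] % N (A's equivalence test, also used by representative())
def pvEquivB (N : Int) (a b : Int × Int) : Bool :=
  PySem.Int.mod (a.1 * b.2) N == PySem.Int.mod (b.1 * a.2) N

def pvElements (N : Int) : List (Int × Int) :=
  (PySem.List.pyRange 1 (N + 1) 1).foldl (fun els n =>
    (PySem.List.pyRange 1 (N + 1) 1).foldl (fun els m =>
      if pvCoprime m n N then els ++ [(m, n)] else els) els) []

def pvRemoveL (N : Int) (els : List (Int × Int)) : List (Int × Int) :=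
  (PySem.List.pyRange 0 (PySem.List.len els) 1).foldl (fun rem i =>
    (PySem.List.pyRange i (PySem.List.len els) 1).foldl (fun rem j =>
      if pvEquivB N (PySem.List.pyGetD els i (0, 0)) (PySem.List.pyGetD els j (0, 0)) && !(i == j)
      then rem ++ [PySem.List.pyGetD els j (0, 0)] else rem) rem) []

def pvMSymbols (N : Int) : List (Int × Int) :=
  (pvRemoveL N (pvElements N)).foldl
    (fun els r => if r ∈ els then (PySem.List.remove? els r).getD els else els) (pvElements N)

def pvRepresentative (N : Int) (reps : List (Int × Int)) (e : Int × Int) : Option (Int × Int) :=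
  reps.find? (fun M => pvEquivB N M e)

def three_term_relations (N : Int) : List String :=
  let representatives := pvMSymbols N
  (representatives.foldl (fun (st : List String × List (Option (Int × Int))) M =>
    if some M ∈ st.2 then st
    else
      let r2 := pvRepresentative N representatives (M.1 + M.2, -M.1)
      let r3 := pvRepresentative N representatives (M.2, -M.1 - M.2)
      (st.1 ++ [pvFmt M ++ " + " ++ pvFmtOpt r2 ++ " + " ++ pvFmtOpt r3 ++ " = 0"],
       st.2 ++ [some M, r2, r3])) ([], [])).1

-- ===== PORT B =====

-- first r in reps with (r[0]*n - r[1]*m) % N == 0, else None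
def pvFirstMatch (N : Int) (reps : List (Int × Int)) (m n : Int) : Option (Int × Int) :=
  reps.find? (fun r => PySem.Int.mod (r.1 * n - r.2 * m) N == 0)

-- (x - 1) % N + 1
def pvNorm (N x : Int) : Int := PySem.Int.mod (x - 1) N + 1

def pvGenAlt (N : Int) : List (Int × Int) × PySem.Dict (Int × Int) (Int × Int) :=
  (PySem.List.pyRange 1 (N + 1) 1).foldl (fun st n =>
    (PySem.List.pyRange 1 (N + 1) 1).foldl
      (fun (st : List (Int × Int) × PySem.Dict (Int × Int) (Int × Int)) m =>
        if pvCoprime m n N then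
          match pvFirstMatch N st.1 m n with
          | none => (st.1 ++ [(m, n)], st.2.insert (m, n) (m, n))
          | some r => (st.1, st.2.insert (m, n) r)
        else st) st) ([], PySem.Dict.empty)

def three_term_relations_alt (N : Int) : List String :=
  let gen := pvGenAlt N
  (gen.1.foldl (fun (st : List String × PySem.Set (Int × Int)) M =>
    if PySem.Set.contains st.2 M then st
    else
      let r2 := gen.2.get? (pvNorm N (M.1 + M.2), pvNorm N (-M.1))
      let r3 := gen.2.get? (pvNorm N M.2, pvNorm N (-M.1 - M.2))
      (st.1 ++ [pvFmt M ++ " + " ++ pvFmtOpt r2 ++ " + " ++ pvFmtOpt r3 ++ " = 0"],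
       let d1 := PySem.Set.add st.2 M
       let d2 := match r2 with | some r => PySem.Set.add d1 r | none => d1
       match r3 with | some r => PySem.Set.add d2 r | none => d2)) ([], PySem.Set.empty)).1

-- ===== PRECONDITION & SPEC =====
def Spec_three_term_relations (N : Int) (out : List String) : Prop := out = three_term_relations_alt N
instance (N : Int) (out : List String) : Decidable (Spec_three_term_relations N out) := by unfold Spec_three_term_relations; infer_instance

-- ===== CLAIM (what is proved, stated in full; the proofs are below) =====
def Claim_equal_three_term_relations : Prop := ∀ (N : Int), Dom_three_term_relations N → Spec_three_term_relations N (three_term_relations N)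


-- ===== LEMMAS AND PROOFS =====

-- The candidate symbols [m, n] in A's generation order (closed form of A's first loop / B's scan order)
def pvE (N : Int) : List (Int × Int) :=
  (PySem.List.pyRange 1 (N + 1) 1).flatMap (fun n =>
    ((PySem.List.pyRange 1 (N + 1) 1).filter (fun m => pvCoprime m n N)).map (fun m => (m, n)))

-- e is kept iff no candidate generated before it is equivalent to it
def pvGood (N : Int) (e : Int × Int) : Bool :=
  !(((pvE N).take (List.idxOf e (pvE N))).any (fun x => pvEquivB N x e))

-- the representatives list both programs end up with
def pvF (N : Int) : List (Int × Int) := (pvE N).filter (pvGood N)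

-- B's matching predicate, with the query symbol first
def pvPredB (N : Int) (e r : Int × Int) : Bool := PySem.Int.mod (r.1 * e.2 - r.2 * e.1) N == 0

-- B's generation step over one candidate
def pvBStep (N : Int) (st : List (Int × Int) × PySem.Dict (Int × Int) (Int × Int))
    (e : Int × Int) : List (Int × Int) × PySem.Dict (Int × Int) (Int × Int) :=
  match pvFirstMatch N st.1 e.1 e.2 with
  | none => (st.1 ++ [e], st.2.insert e e)
  | some r => (st.1, st.2.insert e r)

theorem pvElements_eq (N : Int) : pvElements N = pvE N := by
  simp only [pvElements, pvE, PySem.List.foldl_append_if, PySem.List.foldl_append_eq_flatMap,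
    List.nil_append]

theorem pvMem_pvE {N : Int} {p : Int × Int} :
    p ∈ pvE N ↔ 1 ≤ p.1 ∧ p.1 < N + 1 ∧ 1 ≤ p.2 ∧ p.2 < N + 1 ∧ pvCoprime p.1 p.2 N = true := by
  unfold pvE
  simp only [List.mem_flatMap, List.mem_map, List.mem_filter, PySem.List.mem_pyRange_one]
  constructor
  · rintro ⟨n, ⟨hn1, hn2⟩, m, ⟨⟨hm1, hm2⟩, hc⟩, rfl⟩
    exact ⟨hm1, hm2, hn1, hn2, hc⟩
  · rintro ⟨h1, h2, h3, h4, h5⟩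
    exact ⟨p.2, ⟨h3, h4⟩, p.1, ⟨⟨h1, h2⟩, h5⟩, rfl⟩

theorem pvNodup_pvE (N : Int) : (pvE N).Nodup := by
  unfold pvE
  rw [List.nodup_flatMap]
  constructor
  · intro n _
    exact (List.Nodup.filter _ (PySem.List.nodup_pyRange_one 1 (N + 1))).map
      (fun a b h => by simpa using congrArg Prod.fst h)
  · refine List.Pairwise.imp ?_ (PySem.List.nodup_pyRange_one 1 (N + 1))
    intro a b hab x hx1 hx2
    simp only [List.mem_map, List.mem_filter] at hx1 hx2
    obtain ⟨m1, _, rfl⟩ := hx1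
    obtain ⟨m2, _, h⟩ := hx2
    have hba : b = a := by simpa using congrArg Prod.snd h
    exact hab hba.symm

theorem pvEquivB_iff {N : Int} (hN : 0 < N) (a b : Int × Int) :
    pvEquivB N a b = true ↔ N ∣ (a.1 * b.2 - b.1 * a.2) := by
  unfold pvEquivB
  rw [beq_iff_eq, PySem.Int.mod_eq_emod_of_pos hN, PySem.Int.mod_eq_emod_of_pos hN,
    Int.emod_eq_emod_iff_emod_sub_eq_zero, PySem.Int.emod_eq_zero_iff_dvd]

theorem pvPredB_iff (N : Int) (e r : Int × Int) :
    pvPredB N e r = true ↔ N ∣ (r.1 * e.2 - e.1 * r.2) := by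
  unfold pvPredB
  rw [beq_iff_eq, PySem.Int.mod_eq_zero_iff_dvd,
    show r.1 * e.2 - r.2 * e.1 = r.1 * e.2 - e.1 * r.2 from by ring]

theorem pvPredB_eq_equivB {N : Int} (hN : 0 < N) (e r : Int × Int) :
    pvPredB N e r = pvEquivB N r e := by
  apply Bool.eq_iff_iff.mpr
  rw [pvPredB_iff, pvEquivB_iff hN]

theorem pvDvd_trans {N : Int} {x r e : Int × Int}
    (hx : pvCoprime x.1 x.2 N = true)
    (h1 : N ∣ (r.1 * x.2 - x.1 * r.2)) (h2 : N ∣ (x.1 * e.2 - e.1 * x.2)) :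
    N ∣ (r.1 * e.2 - e.1 * r.2) := by
  have hg : ((Int.gcd (Int.gcd x.1 x.2 : Int) N : Int)) = 1 := by
    unfold pvCoprime at hx
    exact beq_iff_eq.mp hx
  set X := r.1 * e.2 - e.1 * r.2 with hX
  have c1 : N ∣ x.1 * X := by
    have h : x.1 * X = r.1 * (x.1 * e.2 - e.1 * x.2) + e.1 * (r.1 * x.2 - x.1 * r.2) := by
      rw [hX]; ring
    rw [h]
    exact dvd_add (h2.mul_left _) (h1.mul_left _)
  have c2 : N ∣ x.2 * X := by
    have h : x.2 * X = e.2 * (r.1 * x.2 - x.1 * r.2) + r.2 * (x.1 * e.2 - e.1 * x.2) := by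
      rw [hX]; ring
    rw [h]
    exact dvd_add (h1.mul_left _) (h2.mul_left _)
  have hgN : N ∣ (Int.gcd x.1 x.2 : Int) * X := by
    rw [Int.gcd_eq_gcd_ab x.1 x.2,
      show (x.1 * Int.gcdA x.1 x.2 + x.2 * Int.gcdB x.1 x.2) * X
        = Int.gcdA x.1 x.2 * (x.1 * X) + Int.gcdB x.1 x.2 * (x.2 * X) from by ring]
    exact dvd_add (c1.mul_left _) (c2.mul_left _)
  obtain ⟨u, hu⟩ := hgN
  have hb2 := Int.gcd_eq_gcd_ab (Int.gcd x.1 x.2 : Int) N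
  rw [hg] at hb2
  refine ⟨Int.gcdA (Int.gcd x.1 x.2 : Int) N * u + X * Int.gcdB (Int.gcd x.1 x.2 : Int) N, ?_⟩
  calc X = X * 1 := by ring
    _ = X * ((Int.gcd x.1 x.2 : Int) * Int.gcdA (Int.gcd x.1 x.2 : Int) N
          + N * Int.gcdB (Int.gcd x.1 x.2 : Int) N) := by rw [← hb2]
    _ = Int.gcdA (Int.gcd x.1 x.2 : Int) N * ((Int.gcd x.1 x.2 : Int) * X)
          + N * (X * Int.gcdB (Int.gcd x.1 x.2 : Int) N) := by ring
    _ = Int.gcdA (Int.gcd x.1 x.2 : Int) N * (N * u)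
          + N * (X * Int.gcdB (Int.gcd x.1 x.2 : Int) N) := by rw [hu]
    _ = N * (Int.gcdA (Int.gcd x.1 x.2 : Int) N * u + X * Int.gcdB (Int.gcd x.1 x.2 : Int) N) := by
          ring

theorem pvRemoveL_mem {N : Int} (e : Int × Int) :
    e ∈ pvRemoveL N (pvE N) ↔ ∃ i j : Nat, i < j ∧ j < (pvE N).length ∧
      pvEquivB N ((pvE N).getD i (0, 0)) ((pvE N).getD j (0, 0)) = true ∧ e = (pvE N).getD j (0, 0) := by
  unfold pvRemoveL
  simp only [PySem.List.foldl_append_if, PySem.List.foldl_append_eq_flatMap, List.nil_append,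
    PySem.List.len_eq]
  rw [List.mem_flatMap]
  constructor
  · rintro ⟨i, hi, hmem⟩
    rw [List.mem_map] at hmem
    obtain ⟨j, hj, rfl⟩ := hmem
    rw [List.mem_filter] at hj
    obtain ⟨hjr, hp⟩ := hj
    rw [PySem.List.mem_pyRange_one] at hi hjr
    rw [Bool.and_eq_true] at hp
    have hij : i ≠ j := by
      intro h
      rw [h] at hp
      simp at hp
    have h1 : ((i.toNat : Nat) : Int) = i := by omega
    have h2 : ((j.toNat : Nat) : Int) = j := by omega
    refine ⟨i.toNat, j.toNat, by omega, by omega, ?_, ?_⟩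
    · have := hp.1
      rw [← h1, ← h2, PySem.List.pyGetD_natCast, PySem.List.pyGetD_natCast] at this
      exact this
    · rw [← h2, PySem.List.pyGetD_natCast, Int.toNat_natCast]
  · rintro ⟨i, j, hij, hjlen, hequiv, he⟩
    refine ⟨(i : Int), ?_, ?_⟩
    · rw [PySem.List.mem_pyRange_one]
      omega
    · rw [List.mem_map]
      refine ⟨(j : Int), ?_, ?_⟩
      · rw [List.mem_filter, PySem.List.mem_pyRange_one]
        refine ⟨⟨by omega, by omega⟩, ?_⟩
        rw [Bool.and_eq_true]
        refine ⟨?_, by simp; omega⟩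
        rw [PySem.List.pyGetD_natCast, PySem.List.pyGetD_natCast]
        exact hequiv
      · rw [PySem.List.pyGetD_natCast]
        exact he.symm

theorem pvRemoveFold_eq_filter (rem : List (Int × Int)) :
    ∀ S : List (Int × Int), S.Nodup →
      rem.foldl (fun es r => if r ∈ es then (PySem.List.remove? es r).getD es else es) S
        = S.filter (fun e => decide (e ∉ rem)) := by
  induction rem with
  | nil =>
    intro S _
    simp
  | cons r rs ih =>
    intro S hS
    rw [List.foldl_cons]
    have hgetD : (PySem.List.remove? S r).getD S = S.erase r := by
      unfold PySem.List.remove?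
      rw [List.erase_eq_eraseIdx]
      cases List.idxOf? r S <;> simp
    by_cases hr : r ∈ S
    · rw [if_pos hr, hgetD, List.Nodup.erase_eq_filter hS,
        ih _ (List.Nodup.filter _ hS), List.filter_filter]
      apply List.filter_congr
      intro e _
      by_cases h1 : e = r
      · simp [h1]
      · by_cases h2 : e ∈ rs <;> simp [h1, h2]
    · rw [if_neg hr, ih S hS]
      apply List.filter_congr
      intro e he
      have hne : e ≠ r := fun h => hr (h ▸ he)
      simp [hne]

theorem pvMSymbols_eq (N : Int) : pvMSymbols N = pvF N := by
  unfold pvMSymbols pvF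
  rw [pvElements_eq, pvRemoveFold_eq_filter _ _ (pvNodup_pvE N)]
  apply List.filter_congr
  intro e he
  have hnd := pvNodup_pvE N
  have hidxlt : List.idxOf e (pvE N) < (pvE N).length := List.idxOf_lt_length_iff.mpr he
  have hkey : e ∈ pvRemoveL N (pvE N) ↔
      ((pvE N).take (List.idxOf e (pvE N))).any (fun x => pvEquivB N x e) = true := by
    rw [pvRemoveL_mem, List.any_eq_true]
    constructor
    · rintro ⟨i, j, hij, hjlen, hequiv, hej⟩
      have hEj : (pvE N).getD j (0, 0) = (pvE N)[j] := List.getD_eq_getElem _ _ hjlen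
      have hje : List.idxOf e (pvE N) = j := by
        rw [hej, hEj]
        exact List.Nodup.idxOf_getElem hnd j hjlen
      have hilen : i < (pvE N).length := by omega
      refine ⟨(pvE N)[i], ?_, ?_⟩
      · rw [List.mem_take_iff_getElem]
        exact ⟨i, by omega, rfl⟩
      · rw [← List.getD_eq_getElem _ (0, 0) hilen, hej]
        exact hequiv
    · rintro ⟨x, hx, hxe⟩
      rw [List.mem_take_iff_getElem] at hx
      obtain ⟨i, hi, hxi⟩ := hx
      have hilen : i < (pvE N).length := by omega
      refine ⟨i, List.idxOf e (pvE N), by omega, hidxlt, ?_, ?_⟩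
      · rw [List.getD_eq_getElem _ _ hilen, List.getD_eq_getElem _ _ hidxlt, hxi,
          List.getElem_idxOf hidxlt]
        exact hxe
      · rw [List.getD_eq_getElem _ _ hidxlt, List.getElem_idxOf hidxlt]
  unfold pvGood
  apply Bool.eq_iff_iff.mpr
  rw [decide_eq_true_eq]
  simp [hkey]

theorem pvGenAlt_eq_foldl (N : Int) :
    pvGenAlt N = (pvE N).foldl (pvBStep N) ([], PySem.Dict.empty) := by
  simp only [pvGenAlt, pvE, List.foldl_flatMap, List.foldl_map,
    ← PySem.List.foldl_if_eq_foldl_filter]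
  rfl

theorem pvGenFold_inv {N : Int} (hN : 0 < N) :
    ∀ (rest pre : List (Int × Int)) (st : List (Int × Int) × PySem.Dict (Int × Int) (Int × Int)),
      pre ++ rest = pvE N →
      st.1 = pre.filter (pvGood N) →
      (∀ x ∈ pre, ∃ r ∈ st.1, pvPredB N x r = true) →
      (∀ k ∈ pre, st.2.get? k = (pvF N).find? (fun r => pvPredB N k r)) →
      (rest.foldl (pvBStep N) st).1 = pvF N ∧
        (∀ k ∈ pvE N, (rest.foldl (pvBStep N) st).2.get? k = (pvF N).find? (fun r => pvPredB N k r)) := by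
  intro rest
  induction rest with
  | nil =>
    intro pre st hsplit hst1 _ hst4
    rw [List.append_nil] at hsplit
    subst hsplit
    rw [List.foldl_nil]
    refine ⟨?_, hst4⟩
    unfold pvF
    exact hst1
  | cons e rest ih =>
    intro pre st hsplit hst1 hst3 hst4
    have hnodup : (pre ++ e :: rest).Nodup := by rw [hsplit]; exact pvNodup_pvE N
    have hepre : e ∉ pre := fun h =>
      (List.disjoint_of_nodup_append hnodup) h (by simp)
    have heE : e ∈ pvE N := by rw [← hsplit]; simp
    have hidx : List.idxOf e (pvE N) = pre.length := by
      rw [← hsplit, List.idxOf_append, if_neg hepre, List.idxOf_cons]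
      simp
    have htake : (pvE N).take (List.idxOf e (pvE N)) = pre := by
      rw [hidx, ← hsplit, List.take_left' rfl]
    have hgood : pvGood N e = !(pre.any fun x => pvEquivB N x e) := by
      unfold pvGood
      rw [htake]
    have hany : (st.1.any fun r => pvPredB N e r) = (pre.any fun x => pvEquivB N x e) := by
      apply Bool.eq_iff_iff.mpr
      simp only [List.any_eq_true]
      constructor
      · rintro ⟨r, hr, hpr⟩
        refine ⟨r, ?_, ?_⟩
        · rw [hst1] at hr
          exact List.mem_of_mem_filter hr
        · rw [← pvPredB_eq_equivB hN]
          exact hpr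
      · rintro ⟨x, hx, hxe⟩
        obtain ⟨r, hr, hrx⟩ := hst3 x hx
        refine ⟨r, hr, ?_⟩
        rw [pvPredB_iff]
        have hxE : x ∈ pvE N := by rw [← hsplit]; exact List.mem_append_left _ hx
        exact pvDvd_trans (pvMem_pvE.mp hxE).2.2.2.2 ((pvPredB_iff N x r).mp hrx)
          ((pvEquivB_iff hN x e).mp hxe)
    have hsplit' : (pre ++ [e]) ++ rest = pvE N := by simpa using hsplit
    have hFdec : pvF N = pre.filter (pvGood N) ++ List.filter (pvGood N) (e :: rest) := by
      unfold pvF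
      rw [← hsplit, List.filter_append]
    rw [List.foldl_cons]
    have hmatch : pvFirstMatch N st.1 e.1 e.2 = st.1.find? fun r => pvPredB N e r := rfl
    cases hfind : st.1.find? fun r => pvPredB N e r with
    | none =>
      have hanyF : (pre.any fun x => pvEquivB N x e) = false := by
        rw [← hany, List.any_eq_false]
        rw [List.find?_eq_none] at hfind
        exact hfind
      have hgoodT : pvGood N e = true := by rw [hgood, hanyF]; rfl
      have hstep : pvBStep N st e = (st.1 ++ [e], st.2.insert e e) := by
        unfold pvBStep
        rw [hmatch, hfind]
      rw [hstep]
      refine ih (pre ++ [e]) _ hsplit' ?_ ?_ ?_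
      · show st.1 ++ [e] = (pre ++ [e]).filter (pvGood N)
        rw [List.filter_append, hst1]
        simp [hgoodT]
      · intro x hx
        rcases List.mem_append.mp hx with hx | hx
        · obtain ⟨r, hr, h⟩ := hst3 x hx
          exact ⟨r, List.mem_append_left _ hr, h⟩
        · rw [List.mem_singleton] at hx
          subst hx
          refine ⟨x, List.mem_append_right _ (by simp), ?_⟩
          rw [pvPredB_iff]
          simp
      · intro k hk
        rcases List.mem_append.mp hk with hk | hk
        · have hke : k ≠ e := fun h => hepre (h ▸ hk)
          show (st.2.insert e e).get? k = _
          rw [PySem.Dict.get?_insert, if_neg hke]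
          exact hst4 k hk
        · rw [List.mem_singleton] at hk
          subst hk
          show (st.2.insert k k).get? k = _
          rw [PySem.Dict.get?_insert, if_pos rfl, hFdec, List.find?_append, ← hst1, hfind,
            Option.none_or, List.filter_cons, if_pos hgoodT,
            List.find?_cons_of_pos (by rw [pvPredB_iff]; simp)]
    | some r =>
      have hr1 : r ∈ st.1 := List.mem_of_find?_eq_some hfind
      have hpr : pvPredB N e r = true := List.find?_some hfind
      have hanyT : (pre.any fun x => pvEquivB N x e) = true := by
        rw [← hany, List.any_eq_true]
        exact ⟨r, hr1, hpr⟩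
      have hgoodF : pvGood N e = false := by rw [hgood, hanyT]; rfl
      have hstep : pvBStep N st e = (st.1, st.2.insert e r) := by
        unfold pvBStep
        rw [hmatch, hfind]
      rw [hstep]
      refine ih (pre ++ [e]) _ hsplit' ?_ ?_ ?_
      · show st.1 = (pre ++ [e]).filter (pvGood N)
        rw [List.filter_append, hst1]
        simp [hgoodF]
      · intro x hx
        rcases List.mem_append.mp hx with hx | hx
        · exact hst3 x hx
        · rw [List.mem_singleton] at hx
          subst hx
          exact ⟨r, hr1, hpr⟩
      · intro k hk
        rcases List.mem_append.mp hk with hk | hk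
        · have hke : k ≠ e := fun h => hepre (h ▸ hk)
          show (st.2.insert e r).get? k = _
          rw [PySem.Dict.get?_insert, if_neg hke]
          exact hst4 k hk
        · rw [List.mem_singleton] at hk
          subst hk
          show (st.2.insert k r).get? k = _
          rw [PySem.Dict.get?_insert, if_pos rfl, hFdec, List.find?_append, ← hst1, hfind,
            Option.some_or]

theorem pvGenAlt_spec {N : Int} (hN : 0 < N) :
    (pvGenAlt N).1 = pvF N ∧
      (∀ k ∈ pvE N, (pvGenAlt N).2.get? k = (pvF N).find? (fun r => pvPredB N k r)) := by
  rw [pvGenAlt_eq_foldl]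
  exact pvGenFold_inv hN (pvE N) [] ([], PySem.Dict.empty) (by simp) rfl (by simp) (by simp)

theorem pvGcd3_congr {N a b a' b' : Int} (ha : N ∣ a' - a) (hb : N ∣ b' - b) :
    Int.gcd (Int.gcd a' b' : Int) N = Int.gcd (Int.gcd a b : Int) N := by
  have h1 : ∀ (u v k : Int), Int.gcd (Int.gcd (u + k * N) v : Int) N = Int.gcd (Int.gcd u v : Int) N := by
    intro u v k
    rw [Int.gcd_assoc, Int.gcd_assoc]
    obtain ⟨c, hc⟩ : ((Int.gcd v N : Int)) ∣ N := Int.gcd_dvd_right v N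
    rw [show u + k * N = u + (Int.gcd v N : Int) * (k * c) from by linear_combination k * hc]
    exact Int.gcd_add_mul_left_left _ u (k * c)
  obtain ⟨k, hk⟩ := ha
  obtain ⟨l, hl⟩ := hb
  have ha' : a' = a + k * N := by linarith
  have hb' : b' = b + l * N := by linarith
  subst ha' hb'
  rw [h1 a (b + l * N) k]
  rw [show (Int.gcd a (b + l * N) : Int) = (Int.gcd (b + l * N) a : Int) from by rw [Int.gcd_comm]]
  rw [h1 b a l]
  rw [show (Int.gcd b a : Int) = (Int.gcd a b : Int) from by rw [Int.gcd_comm]]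

theorem pvNorm_sub_dvd {N : Int} (hN : 0 < N) (x : Int) : N ∣ pvNorm N x - x := by
  unfold pvNorm
  rw [PySem.Int.mod_eq_emod_of_pos hN, Int.emod_def]
  exact ⟨-((x - 1) / N), by ring⟩

theorem pvNorm_bounds {N : Int} (hN : 0 < N) (x : Int) :
    1 ≤ pvNorm N x ∧ pvNorm N x < N + 1 := by
  unfold pvNorm
  have h1 := PySem.Int.mod_nonneg (x - 1) hN
  have h2 := PySem.Int.mod_lt (x - 1) hN
  omega

theorem pvQuery_coprime1 {N : Int} {M : Int × Int} (h : pvCoprime M.1 M.2 N = true) :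
    pvCoprime (M.1 + M.2) (-M.1) N = true := by
  unfold pvCoprime at h ⊢
  rw [show Int.gcd (M.1 + M.2) (-M.1) = Int.gcd M.1 M.2 from by
    rw [Int.gcd_comm, Int.neg_gcd, Int.gcd_comm, show M.1 + M.2 = M.2 + M.1 from add_comm _ _,
      Int.gcd_add_self_left, Int.gcd_comm]]
  exact h

theorem pvQuery_coprime2 {N : Int} {M : Int × Int} (h : pvCoprime M.1 M.2 N = true) :
    pvCoprime M.2 (-M.1 - M.2) N = true := by
  unfold pvCoprime at h ⊢
  rw [show Int.gcd M.2 (-M.1 - M.2) = Int.gcd M.1 M.2 from by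
    rw [Int.gcd_comm, show -M.1 - M.2 = -(M.1 + M.2) from by ring, Int.neg_gcd,
      Int.gcd_add_self_left]]
  exact h

-- B's dict lookup of the residue-normalised query equals A's representative() scan
theorem pvLookup_eq_rep {N : Int} (hN : 0 < N) (q : Int × Int)
    (hq : pvCoprime q.1 q.2 N = true) :
    (pvGenAlt N).2.get? (pvNorm N q.1, pvNorm N q.2) = pvRepresentative N (pvF N) q := by
  have hnqE : (pvNorm N q.1, pvNorm N q.2) ∈ pvE N := by
    rw [pvMem_pvE]
    obtain ⟨h1, h2⟩ := pvNorm_bounds hN q.1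
    obtain ⟨h3, h4⟩ := pvNorm_bounds hN q.2
    refine ⟨h1, h2, h3, h4, ?_⟩
    unfold pvCoprime at hq ⊢
    rw [beq_iff_eq] at hq ⊢
    rw [pvGcd3_congr (pvNorm_sub_dvd hN q.1) (pvNorm_sub_dvd hN q.2)]
    exact hq
  rw [(pvGenAlt_spec hN).2 _ hnqE]
  unfold pvRepresentative
  congr 1
  funext r
  apply Bool.eq_iff_iff.mpr
  rw [pvPredB_iff, pvEquivB_iff hN]
  have d1 := pvNorm_sub_dvd hN q.1
  have d2 := pvNorm_sub_dvd hN q.2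
  constructor
  · intro h
    have heq : r.1 * q.2 - q.1 * r.2
        = (r.1 * (pvNorm N q.1, pvNorm N q.2).2 - (pvNorm N q.1, pvNorm N q.2).1 * r.2)
          - (r.1 * (pvNorm N q.2 - q.2) - (pvNorm N q.1 - q.1) * r.2) := by ring
    rw [heq]
    exact dvd_sub h (dvd_sub (d2.mul_left _) (d1.mul_right _))
  · intro h
    have heq : r.1 * (pvNorm N q.1, pvNorm N q.2).2 - (pvNorm N q.1, pvNorm N q.2).1 * r.2
        = (r.1 * q.2 - q.1 * r.2) + (r.1 * (pvNorm N q.2 - q.2) - (pvNorm N q.1 - q.1) * r.2) := by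
      ring
    rw [heq]
    exact dvd_add h (dvd_sub (d2.mul_left _) (d1.mul_right _))

theorem pvRelFold_eq {N : Int} (hN : 0 < N) :
    ∀ (R : List (Int × Int)) (sa : List String × List (Option (Int × Int)))
      (sb : List String × PySem.Set (Int × Int)),
      (∀ M ∈ R, M ∈ pvF N) → sa.1 = sb.1 → (∀ x, some x ∈ sa.2 ↔ x ∈ sb.2) →
      (R.foldl (fun (st : List String × List (Option (Int × Int))) M =>
        if some M ∈ st.2 then st
        else
          let r2 := pvRepresentative N (pvF N) (M.1 + M.2, -M.1)
          let r3 := pvRepresentative N (pvF N) (M.2, -M.1 - M.2)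
          (st.1 ++ [pvFmt M ++ " + " ++ pvFmtOpt r2 ++ " + " ++ pvFmtOpt r3 ++ " = 0"],
           st.2 ++ [some M, r2, r3])) sa).1
      = (R.foldl (fun (st : List String × PySem.Set (Int × Int)) M =>
        if PySem.Set.contains st.2 M then st
        else
          let r2 := (pvGenAlt N).2.get? (pvNorm N (M.1 + M.2), pvNorm N (-M.1))
          let r3 := (pvGenAlt N).2.get? (pvNorm N M.2, pvNorm N (-M.1 - M.2))
          (st.1 ++ [pvFmt M ++ " + " ++ pvFmtOpt r2 ++ " + " ++ pvFmtOpt r3 ++ " = 0"],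
           let d1 := PySem.Set.add st.2 M
           let d2 := match r2 with | some r => PySem.Set.add d1 r | none => d1
           match r3 with | some r => PySem.Set.add d2 r | none => d2)) sb).1 := by
  intro R
  induction R with
  | nil =>
    intro sa sb _ h1 _
    simpa using h1
  | cons M R ih =>
    intro sa sb hmem h1 h2
    rw [List.foldl_cons, List.foldl_cons]
    have hMF : M ∈ pvF N := hmem M (by simp)
    have hME : M ∈ pvE N := List.mem_of_mem_filter hMF
    have hcop := (pvMem_pvE.mp hME).2.2.2.2
    have hq2 : (pvGenAlt N).2.get? (pvNorm N (M.1 + M.2), pvNorm N (-M.1))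
        = pvRepresentative N (pvF N) (M.1 + M.2, -M.1) :=
      pvLookup_eq_rep hN (M.1 + M.2, -M.1) (pvQuery_coprime1 hcop)
    have hq3 : (pvGenAlt N).2.get? (pvNorm N M.2, pvNorm N (-M.1 - M.2))
        = pvRepresentative N (pvF N) (M.2, -M.1 - M.2) :=
      pvLookup_eq_rep hN (M.2, -M.1 - M.2) (pvQuery_coprime2 hcop)
    have hmem' : ∀ M' ∈ R, M' ∈ pvF N := fun M' h => hmem M' (by simp [h])
    have hcond : (some M ∈ sa.2) ↔ (PySem.Set.contains sb.2 M = true) := by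
      rw [PySem.Set.contains_iff]
      exact h2 M
    by_cases hM : some M ∈ sa.2
    · rw [if_pos hM, if_pos (hcond.mp hM)]
      exact ih _ _ hmem' h1 h2
    · rw [if_neg hM, if_neg (fun h => hM (hcond.mpr h))]
      apply ih _ _ hmem'
      · simp only
        rw [h1, hq2, hq3]
      · intro x
        simp only [List.mem_append, List.mem_cons, List.not_mem_nil, or_false]
        rw [hq2, hq3]
        cases hr2 : pvRepresentative N (pvF N) (M.1 + M.2, -M.1) with
        | none =>
          cases hr3 : pvRepresentative N (pvF N) (M.2, -M.1 - M.2) with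
          | none => simp [PySem.Set.mem_add, h2 x]
          | some r3v => (simp [PySem.Set.mem_add, h2 x]); (try tauto)
        | some r2v =>
          cases hr3 : pvRepresentative N (pvF N) (M.2, -M.1 - M.2) with
          | none => (simp [PySem.Set.mem_add, h2 x]); (try tauto)
          | some r3v => (simp [PySem.Set.mem_add, h2 x]); (try tauto)

theorem pvMain_pos {N : Int} (hN : 0 < N) :
    three_term_relations N = three_term_relations_alt N := by
  unfold three_term_relations three_term_relations_alt
  simp only [pvMSymbols_eq N, (pvGenAlt_spec hN).1]
  exact pvRelFold_eq hN (pvF N) ([], []) ([], PySem.Set.empty) (fun M h => h) rfl (by simp)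

theorem pvMain_nonpos {N : Int} (hN : N ≤ 0) :
    three_term_relations N = three_term_relations_alt N := by
  have hr : PySem.List.pyRange 1 (N + 1) 1 = [] := PySem.List.pyRange_one_eq_nil (by omega)
  have hr0 : PySem.List.pyRange 0 0 1 = [] := PySem.List.pyRange_one_eq_nil (by omega)
  unfold three_term_relations three_term_relations_alt pvMSymbols pvRemoveL pvElements pvGenAlt
  simp [hr, hr0, PySem.List.len_eq]


-- ===== VERDICT (by name: the statement is the Claim_ definition above) =====
theorem three_term_relations_spec : Claim_equal_three_term_relations := by
  intro N _
  unfold Spec_three_term_relations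
  rcases lt_or_ge 0 N with hN | hN
  · exact pvMain_pos hN
  · exact pvMain_nonpos hN
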